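-- pv_equiv track=rewrite | github.com/zhengFang-Renji/DNA-RWE-project | data encoding1.py | binary_to_ternary
-- ===== SOURCE A (Python) =====
-- def binary_to_ternary(binary_str):
--     """将二进制字符串转换为三进制字符串，无位数限制"""
--     decimal = int(binary_str, 2)
--     if decimal == 0:
--         return '0'  # 处理全0情况
--     ternary = []
--     while decimal > 0:
--         decimal, rem = divmod(decimal, 3)
--         ternary.append(str(rem))
--     return ''.join(reversed(ternary))  # 直接返回反转后的三进制字符串
-- ===== SOURCE B (Python) =====
-- def binary_to_ternary(binary_str):
--     """将二进制字符串转换为三进制字符串，无位数限制"""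
--     n = int(binary_str, 2)
--     p = 1
--     while p * 3 <= n:        # p becomes the largest power of 3 that is <= n (p = 1 when n < 3)
--         p *= 3
--     out = []
--     while p > 0:             # extract digits most-significant-first
--         out.append(str(n // p))
--         n %= p
--         p //= 3
--     return ''.join(out)
-- ===== Notes on version B (the rewrite author's own statement) =====
-- stated objective: alternative
-- what changed: Replaces the least-significant-first divmod-by-3 loop plus reverse-and-join with a most-significant-first extraction: first find the largest power of 3 not exceeding the value, then emit n // p and reduce n %= p, p //= 3 until p reaches 0, which also makes the zero special-case disappear.
-- outside the precondition, e.g. on binary_to_ternary('-1'): A returns '', B returns '-1'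
import Mathlib
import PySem

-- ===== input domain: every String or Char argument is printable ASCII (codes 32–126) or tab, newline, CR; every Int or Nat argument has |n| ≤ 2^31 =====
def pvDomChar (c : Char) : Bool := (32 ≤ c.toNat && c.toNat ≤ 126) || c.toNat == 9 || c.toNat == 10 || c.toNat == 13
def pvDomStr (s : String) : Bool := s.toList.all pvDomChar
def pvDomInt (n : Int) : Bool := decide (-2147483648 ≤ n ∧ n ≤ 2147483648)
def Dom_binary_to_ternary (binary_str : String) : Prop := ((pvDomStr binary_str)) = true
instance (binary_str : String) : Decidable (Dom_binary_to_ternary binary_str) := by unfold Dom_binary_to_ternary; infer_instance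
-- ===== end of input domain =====

-- B extracts the ternary digits most-significant-first (largest power of 3 first, n//p then
-- n %= p, p //= 3) instead of A's least-significant-first divmod loop plus reverse-and-join
-- (objective: alternative decomposition, same cost).

-- termination measure for the divide-by-3 loops (cited by decreasing_by)
theorem pv_fd3_lt (n : Int) (h : 0 < n) : (PySem.Int.floordiv n 3).toNat < n.toNat := by
  rw [PySem.Int.floordiv_eq_ediv_of_pos (by norm_num : (0:Int) < 3)]
  omega

-- ===== PORT A =====
-- while decimal > 0: decimal, rem = divmod(decimal, 3); ternary.append(str(rem))
def pvALoop (decimal : Int) (ternary : List String) : List String :=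
  if h : 0 < decimal then
    pvALoop (PySem.Int.floordiv decimal 3) (ternary ++ [PySem.Int.toStr (PySem.Int.mod decimal 3)])
  else ternary
termination_by decimal.toNat
decreasing_by exact pv_fd3_lt _ h

def binary_to_ternary (binary_str : String) : String :=
  match PySem.Int.ofStrBase? binary_str 2 with
  | none => ""   -- int(binary_str, 2) raises ValueError here; outside Pre_
  | some decimal =>
    if decimal = 0 then "0"
    else PySem.Str.join "" ((pvALoop decimal []).reverse)

-- termination measure for the power-finding loop (cited by decreasing_by)
theorem pv_pow_step_lt (n p : Int) (h : 0 < p ∧ p * 3 ≤ n) : (n - p * 3).toNat < (n - p).toNat := by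
  omega

-- ===== PORT B =====
-- while p * 3 <= n: p *= 3   (the '0 < p' conjunct only makes the recursion total;
-- at the call site p starts at 1 and stays positive, so it never changes the result)
def pvFindPow (n p : Int) : Int :=
  if h : 0 < p ∧ p * 3 ≤ n then pvFindPow n (p * 3) else p
termination_by (n - p).toNat
decreasing_by exact pv_pow_step_lt _ _ h

-- while p > 0: out.append(str(n // p)); n %= p; p //= 3
def pvOutLoop (n p : Int) (out : List String) : List String :=
  if h : 0 < p then
    pvOutLoop (PySem.Int.mod n p) (PySem.Int.floordiv p 3)
      (out ++ [PySem.Int.toStr (PySem.Int.floordiv n p)])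
  else out
termination_by p.toNat
decreasing_by exact pv_fd3_lt _ h

def binary_to_ternary_alt (binary_str : String) : String :=
  match PySem.Int.ofStrBase? binary_str 2 with
  | none => ""
  | some n => PySem.Str.join "" (pvOutLoop n (pvFindPow n 1) [])

-- ===== PRECONDITION & SPEC =====
-- Pre_ excludes strings int(s, 2) rejects (A raises ValueError) and negative literals like
-- "-1": no ternary string is specified for a negative value, A's '' (the loop never runs)
-- and B's str(n//1) are both accidents of the respective digit loops.
def Pre_binary_to_ternary (binary_str : String) : Prop :=
  0 ≤ (PySem.Int.ofStrBase? binary_str 2).getD (-1)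
instance (binary_str : String) : Decidable (Pre_binary_to_ternary binary_str) := by
  unfold Pre_binary_to_ternary; infer_instance
def pvWitness_binary_to_ternary : String := "101"

def Spec_binary_to_ternary (binary_str : String) (out : String) : Prop := out = binary_to_ternary_alt binary_str
instance (binary_str : String) (out : String) : Decidable (Spec_binary_to_ternary binary_str out) := by unfold Spec_binary_to_ternary; infer_instance

-- ===== CLAIM (what is proved, stated in full; the proofs are below) =====
def Claim_equal_binary_to_ternary : Prop := ∀ (binary_str : String), Dom_binary_to_ternary binary_str → Pre_binary_to_ternary binary_str → Spec_binary_to_ternary binary_str (binary_to_ternary binary_str)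

-- ===== LEMMAS AND PROOFS =====

-- canonical most-significant-first ternary digit list, the common reference of both ports
def pvRep (n : Int) : List Char :=
  if h : 0 < n then pvRep (PySem.Int.floordiv n 3) ++ PySem.Int.toChars (PySem.Int.mod n 3)
  else []
termination_by n.toNat
decreasing_by exact pv_fd3_lt _ h

theorem pvALoop_stop (n : Int) (acc : List String) (h : ¬ 0 < n) : pvALoop n acc = acc := by
  rw [pvALoop]; simp [h]

theorem pvALoop_step (n : Int) (acc : List String) (h : 0 < n) :
    pvALoop n acc = pvALoop (PySem.Int.floordiv n 3) (acc ++ [PySem.Int.toStr (PySem.Int.mod n 3)]) := by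
  rw [pvALoop]; simp [h]

theorem pvRep_stop (n : Int) (h : ¬ 0 < n) : pvRep n = [] := by
  rw [pvRep]; simp [h]

theorem pvRep_step (n : Int) (h : 0 < n) :
    pvRep n = pvRep (PySem.Int.floordiv n 3) ++ PySem.Int.toChars (PySem.Int.mod n 3) := by
  rw [pvRep]; simp [h]

theorem pvOutLoop_stop (n p : Int) (acc : List String) (h : ¬ 0 < p) : pvOutLoop n p acc = acc := by
  rw [pvOutLoop]; simp [h]

theorem pvOutLoop_step (n p : Int) (acc : List String) (h : 0 < p) :
    pvOutLoop n p acc = pvOutLoop (PySem.Int.mod n p) (PySem.Int.floordiv p 3)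
      (acc ++ [PySem.Int.toStr (PySem.Int.floordiv n p)]) := by
  rw [pvOutLoop]; simp [h]

theorem pvFindPow_stop (n p : Int) (h : ¬ (0 < p ∧ p * 3 ≤ n)) : pvFindPow n p = p := by
  rw [pvFindPow]; simp [h]

theorem pvFindPow_step (n p : Int) (h : 0 < p ∧ p * 3 ≤ n) :
    pvFindPow n p = pvFindPow n (p * 3) := by
  rw [pvFindPow]; simp [h]

theorem pv_inter_nil (css : List (List Char)) : [].intercalate css = css.flatten := by
  induction css with
  | nil => simp [List.intercalate, List.intersperse]
  | cons c cs ih =>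
    cases cs with
    | nil => simp [List.intercalate, List.intersperse]
    | cons d ds => simp_all [List.intercalate, List.intersperse]

theorem pv_join_nil (l : List String) :
    PySem.Str.join "" l = String.ofList ((l.map String.toList).flatten) := by
  simp [PySem.Str.join, PySem.Chars.join, pv_inter_nil]

theorem pvALoop_acc (k : Nat) : ∀ (n : Int), n.toNat ≤ k → ∀ acc,
    pvALoop n acc = acc ++ pvALoop n [] := by
  induction k with
  | zero =>
    intro n hn acc
    have h : ¬ 0 < n := by omega
    rw [pvALoop_stop _ _ h, pvALoop_stop _ _ h]; simp
  | succ k ih =>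
    intro n hn acc
    by_cases h : 0 < n
    · have hlt := pv_fd3_lt n h
      rw [pvALoop_step _ _ h, pvALoop_step _ [] h,
          ih _ (by omega) (acc ++ [PySem.Int.toStr (PySem.Int.mod n 3)]),
          ih _ (by omega) ([] ++ [PySem.Int.toStr (PySem.Int.mod n 3)])]
      simp
    · rw [pvALoop_stop _ _ h, pvALoop_stop _ _ h]; simp

-- A's reversed digit list spells exactly the canonical digits
theorem pv_key (k : Nat) : ∀ (n : Int), n.toNat ≤ k →
    (((pvALoop n []).reverse).map String.toList).flatten = pvRep n := by
  induction k with
  | zero =>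
    intro n hn
    have h : ¬ 0 < n := by omega
    rw [pvALoop_stop _ _ h, pvRep_stop _ h]; simp
  | succ k ih =>
    intro n hn
    by_cases h : 0 < n
    · have hlt := pv_fd3_lt n h
      rw [pvALoop_step _ [] h, pvRep_step _ h,
          pvALoop_acc k _ (by omega) ([] ++ [PySem.Int.toStr (PySem.Int.mod n 3)])]
      simp only [List.nil_append, List.reverse_append, List.map_append, List.flatten_append,
        List.reverse_singleton, List.map_cons, List.map_nil, List.flatten_cons,
        List.flatten_nil, List.append_nil]
      rw [ih _ (by omega)]
      simp [PySem.Int.toList_toStr]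
    · rw [pvALoop_stop _ _ h, pvRep_stop _ h]; simp

theorem pvOutLoop_acc (k : Nat) : ∀ (n p : Int), p.toNat ≤ k → ∀ acc,
    pvOutLoop n p acc = acc ++ pvOutLoop n p [] := by
  induction k with
  | zero =>
    intro n p hp acc
    have h : ¬ 0 < p := by omega
    rw [pvOutLoop_stop _ _ _ h, pvOutLoop_stop _ _ _ h]; simp
  | succ k ih =>
    intro n p hp acc
    by_cases h : 0 < p
    · have hlt := pv_fd3_lt p h
      rw [pvOutLoop_step _ _ _ h, pvOutLoop_step _ _ [] h,
          ih _ _ (by omega) (acc ++ [PySem.Int.toStr (PySem.Int.floordiv n p)]),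
          ih _ _ (by omega) ([] ++ [PySem.Int.toStr (PySem.Int.floordiv n p)])]
      simp
    · rw [pvOutLoop_stop _ _ _ h, pvOutLoop_stop _ _ _ h]; simp

theorem pv_toChars_digit_len (d : Int) (h0 : 0 ≤ d) (h3 : d < 3) :
    (PySem.Int.toChars d).length = 1 := by
  interval_cases d <;> decide

theorem pv_fd_pos (a p : Int) (hp : 0 < p) : PySem.Int.floordiv a p = a / p :=
  PySem.Int.floordiv_eq_ediv_of_pos hp

theorem pv_md_pos (a p : Int) (hp : 0 < p) : PySem.Int.mod a p = a % p :=
  PySem.Int.mod_eq_emod_of_pos hp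

theorem pvRep_len_le (k : Nat) : ∀ n : Int, n < 3 ^ k → (pvRep n).length ≤ k := by
  induction k with
  | zero =>
    intro n hn
    have h : ¬ 0 < n := by simp only [pow_zero] at hn; omega
    rw [pvRep_stop n h]; simp
  | succ k ih =>
    intro n hn
    by_cases h : 0 < n
    · rw [pvRep_step n h]
      have hd : PySem.Int.floordiv n 3 = n / 3 := pv_fd_pos n 3 (by norm_num)
      have hm : PySem.Int.mod n 3 = n % 3 := pv_md_pos n 3 (by norm_num)
      have hdiv : n / 3 < 3 ^ k := by
        rw [Int.ediv_lt_iff_lt_mul (by norm_num : (0:Int) < 3)]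
        calc n < 3 ^ (k+1) := hn
          _ = 3 ^ k * 3 := by ring
      have hmlen : (PySem.Int.toChars (PySem.Int.mod n 3)).length = 1 := by
        rw [hm]; exact pv_toChars_digit_len _ (Int.emod_nonneg n (by norm_num)) (Int.emod_lt_of_pos n (by norm_num))
      rw [List.length_append, hmlen, hd]
      have := ih (n / 3) hdiv
      omega
    · rw [pvRep_stop n h]; simp

theorem pvRep_len_ge (k : Nat) : ∀ n : Int, 3 ^ k ≤ n → k + 1 ≤ (pvRep n).length := by
  induction k with
  | zero =>
    intro n hn
    have h : 0 < n := by simpa using lt_of_lt_of_le (by norm_num : (0:Int) < 3 ^ 0) hn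
    rw [pvRep_step n h, List.length_append]
    have hm : PySem.Int.mod n 3 = n % 3 := pv_md_pos n 3 (by norm_num)
    have hmlen : (PySem.Int.toChars (PySem.Int.mod n 3)).length = 1 := by
      rw [hm]; exact pv_toChars_digit_len _ (Int.emod_nonneg n (by norm_num)) (Int.emod_lt_of_pos n (by norm_num))
    omega
  | succ k ih =>
    intro n hn
    have h3 : (0:Int) < 3 ^ (k+1) := by positivity
    have h : 0 < n := lt_of_lt_of_le h3 hn
    rw [pvRep_step n h, List.length_append]
    have hd : PySem.Int.floordiv n 3 = n / 3 := pv_fd_pos n 3 (by norm_num)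
    have hdiv : 3 ^ k ≤ n / 3 := by
      rw [Int.le_ediv_iff_mul_le (by norm_num : (0:Int) < 3)]
      calc (3:Int) ^ k * 3 = 3 ^ (k+1) := by ring
        _ ≤ n := hn
    have hmlen : (PySem.Int.toChars (PySem.Int.mod n 3)).length = 1 := by
      rw [pv_md_pos n 3 (by norm_num)]
      exact pv_toChars_digit_len _ (Int.emod_nonneg n (by norm_num)) (Int.emod_lt_of_pos n (by norm_num))
    have := ih (n / 3) hdiv
    rw [hd, hmlen]
    omega

theorem pvRep_digit (d : Int) (h0 : 0 < d) (h3 : d < 3) : pvRep d = PySem.Int.toChars d := by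
  rw [pvRep_step d h0]
  have h1 : PySem.Int.floordiv d 3 = 0 := by interval_cases d <;> decide
  have h2 : PySem.Int.mod d 3 = d := by interval_cases d <;> decide
  rw [h1, h2, pvRep_stop 0 (by norm_num)]
  simp

-- MSB decomposition of the canonical digits: prefix digit d, then zero-padded rest
theorem pv_rep_msb (m : Nat) : ∀ d r : Int, 1 ≤ d → d ≤ 2 → 0 ≤ r → r < 3 ^ m →
    pvRep (d * 3 ^ m + r) =
      PySem.Int.toChars d ++ (List.replicate (m - (pvRep r).length) '0' ++ pvRep r) := by
  induction m with
  | zero =>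
    intro d r h1 h2 hr0 hrlt
    have hr : r = 0 := by omega
    subst hr
    rw [pvRep_stop 0 (by norm_num)]
    rw [show d * 3 ^ 0 + 0 = d from by ring]
    rw [pvRep_digit d h1 (by omega)]
    simp
  | succ m ih =>
    intro d r h1 h2 hr0 hrlt
    have hpow : (0:Int) < 3 ^ m := by positivity
    have hn : 0 < d * 3 ^ (m+1) + r := by nlinarith
    rw [pvRep_step _ hn]
    have hrewrite : d * 3 ^ (m+1) + r = r + (d * 3 ^ m) * 3 := by ring
    have hd : PySem.Int.floordiv (d * 3 ^ (m+1) + r) 3 = d * 3 ^ m + r / 3 := by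
      rw [pv_fd_pos _ 3 (by norm_num), hrewrite, Int.add_mul_ediv_right _ _ (by norm_num : (3:Int) ≠ 0)]
      ring
    have hm : PySem.Int.mod (d * 3 ^ (m+1) + r) 3 = r % 3 := by
      rw [pv_md_pos _ 3 (by norm_num), hrewrite]
      generalize d * 3 ^ m = q
      omega
    have hr30 : 0 ≤ r / 3 := Int.ediv_nonneg hr0 (by norm_num)
    have hr3lt : r / 3 < 3 ^ m := by
      rw [Int.ediv_lt_iff_lt_mul (by norm_num : (0:Int) < 3)]
      calc r < 3 ^ (m+1) := hrlt
        _ = 3 ^ m * 3 := by ring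
    rw [hd, hm, ih d (r / 3) h1 h2 hr30 hr3lt]
    by_cases hr : 0 < r
    · have hrd : PySem.Int.floordiv r 3 = r / 3 := pv_fd_pos r 3 (by norm_num)
      have hrm : PySem.Int.mod r 3 = r % 3 := pv_md_pos r 3 (by norm_num)
      have hlen : (PySem.Int.toChars (r % 3)).length = 1 :=
        pv_toChars_digit_len _ (Int.emod_nonneg r (by norm_num)) (Int.emod_lt_of_pos r (by norm_num))
      have hrep : pvRep r = pvRep (r / 3) ++ PySem.Int.toChars (r % 3) := by
        rw [pvRep_step r hr, hrd, hrm]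
      have hlr : (pvRep r).length = (pvRep (r / 3)).length + 1 := by
        rw [hrep, List.length_append, hlen]
      have hle : (pvRep (r / 3)).length ≤ m := pvRep_len_le m _ hr3lt
      have hsub : m + 1 - (pvRep r).length = m - (pvRep (r / 3)).length := by omega
      rw [hsub, hrep]
      simp [List.append_assoc]
    · have hr0' : r = 0 := by omega
      subst hr0'
      simp only [Int.zero_ediv, Int.zero_emod]
      rw [pvRep_stop 0 (by norm_num)]
      have hc : PySem.Int.toChars (0:Int) = ['0'] := by decide
      simp [hc, List.replicate_succ']
  
-- the MSB extraction loop produces the canonical digits, zero-padded to k+1 places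
theorem pvB1 (k : Nat) : ∀ n : Int, 0 ≤ n → n < 3 ^ (k+1) →
    (((pvOutLoop n ((3:Int) ^ k) []).map String.toList)).flatten =
      List.replicate ((k+1) - (pvRep n).length) '0' ++ pvRep n := by
  induction k with
  | zero =>
    intro n h0 h3
    simp only [pow_zero]
    rw [pvOutLoop_step n 1 [] (by norm_num)]
    have hfd1 : PySem.Int.floordiv (1:Int) 3 = 0 := by decide
    have hnd : PySem.Int.floordiv n 1 = n := by rw [pv_fd_pos n 1 (by norm_num)]; simp
    rw [hfd1, pvOutLoop_stop _ _ _ (by norm_num)]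
    simp only [zero_add, pow_one] at h3
    simp only [List.nil_append, List.map_cons, List.map_nil, List.flatten_cons, List.flatten_nil,
      List.append_nil, PySem.Int.toList_toStr, hnd]
    by_cases hz : 0 < n
    · rw [pvRep_digit n hz (by omega)]
      have : (PySem.Int.toChars n).length = 1 := pv_toChars_digit_len n h0 (by omega)
      rw [this]
      simp
    · have : n = 0 := by omega
      subst this
      rw [pvRep_stop 0 (by norm_num)]
      decide
  | succ k ih =>
    intro n h0 h3
    have hppos : (0:Int) < 3 ^ (k+1) := by positivity
    rw [pvOutLoop_step n (3 ^ (k+1)) [] hppos]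
    have hpd : PySem.Int.floordiv ((3:Int) ^ (k+1)) 3 = 3 ^ k := by
      rw [pv_fd_pos _ 3 (by norm_num)]
      rw [show ((3:Int) ^ (k+1)) = 3 ^ k * 3 by ring]
      exact Int.mul_ediv_cancel _ (by norm_num)
    have hn' : PySem.Int.mod n (3 ^ (k+1)) = n % 3 ^ (k+1) := pv_md_pos _ _ hppos
    have hd' : PySem.Int.floordiv n (3 ^ (k+1)) = n / 3 ^ (k+1) := pv_fd_pos _ _ hppos
    set d := n / 3 ^ (k+1) with hdd
    set r := n % 3 ^ (k+1) with hrr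
    have hr0 : 0 ≤ r := Int.emod_nonneg n (by positivity)
    have hrlt : r < 3 ^ (k+1) := Int.emod_lt_of_pos n hppos
    have hd0 : 0 ≤ d := Int.ediv_nonneg h0 (by positivity)
    have hdlt : d < 3 := by
      rw [hdd, Int.ediv_lt_iff_lt_mul hppos]
      calc n < 3 ^ (k+2) := h3
        _ = 3 * 3 ^ (k+1) := by ring
    have hsplit : d * 3 ^ (k+1) + r = n := by
      rw [hdd, hrr]; rw [mul_comm]; exact Int.ediv_add_emod n (3 ^ (k+1))
    rw [hpd, hn', hd',
        pvOutLoop_acc ((3:Int) ^ k).toNat r (3 ^ k) (le_refl _) ([] ++ [PySem.Int.toStr d])]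
    simp only [List.nil_append, List.map_append, List.flatten_append, List.map_cons, List.map_nil,
      List.flatten_cons, List.flatten_nil, List.append_nil, PySem.Int.toList_toStr]
    rw [ih r hr0 hrlt]
    by_cases hd1 : 1 ≤ d
    · rw [← hsplit, pv_rep_msb (k+1) d r hd1 (by omega) hr0 hrlt]
      have hlen1 : (PySem.Int.toChars d).length = 1 := pv_toChars_digit_len d hd0 hdlt
      have hler : (pvRep r).length ≤ k + 1 := pvRep_len_le (k+1) r hrlt
      have hlen : (PySem.Int.toChars d ++ (List.replicate ((k+1) - (pvRep r).length) '0' ++ pvRep r)).length = k + 2 := by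
        simp [hlen1, List.length_replicate]
        omega
      rw [hlen]
      simp
    · have hdz : d = 0 := by omega
      have hnr : n = r := by rw [← hsplit, hdz]; ring
      have hc0 : PySem.Int.toChars (0:Int) = ['0'] := by decide
      rw [hdz, hc0, hnr]
      have hler : (pvRep r).length ≤ k + 1 := pvRep_len_le (k+1) r hrlt
      rw [show (k+2) - (pvRep r).length = ((k+1) - (pvRep r).length) + 1 by omega,
          List.replicate_succ]
      simp

theorem pvFindPow_spec (k : Nat) : ∀ p n : Int, 0 < p → (n - p).toNat ≤ k →
    ∃ j : Nat, pvFindPow n p = p * 3 ^ j ∧ n < 3 * (p * 3 ^ j) ∧ (j = 0 ∨ p * 3 ^ j ≤ n) := by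
  induction k with
  | zero =>
    intro p n hp hk
    have hstop : ¬ (0 < p ∧ p * 3 ≤ n) := by omega
    refine ⟨0, ?_, ?_, Or.inl rfl⟩
    · rw [pvFindPow_stop n p hstop]; ring
    · simp only [pow_zero, mul_one]; omega
  | succ k ih =>
    intro p n hp hk
    by_cases h : 0 < p ∧ p * 3 ≤ n
    · rw [pvFindPow_step n p h]
      obtain ⟨j, hj1, hj2, hj3⟩ := ih (p * 3) n (by omega) (by omega)
      refine ⟨j + 1, ?_, ?_, Or.inr ?_⟩
      · rw [hj1]; ring
      · calc n < 3 * (p * 3 * 3 ^ j) := hj2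
          _ = 3 * (p * 3 ^ (j+1)) := by ring
      · rcases hj3 with hj | hj
        · subst hj; calc p * 3 ^ (0+1) = p * 3 := by ring
            _ ≤ n := h.2
        · calc p * 3 ^ (j+1) = p * 3 * 3 ^ j := by ring
            _ ≤ n := hj
    · rw [pvFindPow_stop n p h]
      refine ⟨0, by ring, ?_, Or.inl rfl⟩
      simp only [pow_zero, mul_one]; omega

-- B's digit list spells '0' for zero and the canonical digits otherwise
theorem pvB_chars (n : Int) (h0 : 0 ≤ n) :
    ((pvOutLoop n (pvFindPow n 1) []).map String.toList).flatten =
      (if n = 0 then ['0'] else pvRep n) := by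
  obtain ⟨j, hj1, hj2, hj3⟩ := pvFindPow_spec (n - 1).toNat 1 n (by norm_num) (by omega)
  simp only [one_mul] at hj1 hj2 hj3
  have hjlt : n < 3 ^ (j + 1) := by
    calc n < 3 * 3 ^ j := hj2
      _ = 3 ^ (j+1) := by ring
  rw [hj1, pvB1 j n h0 hjlt]
  by_cases hz : n = 0
  · subst hz
    have hj0 : j = 0 := by
      rcases hj3 with hj | hj
      · exact hj
      · exfalso; have : (0:Int) < 3 ^ j := by positivity
        omega
    subst hj0
    rw [pvRep_stop 0 (by norm_num)]
    simp
  · have hge : (3:Int) ^ j ≤ n := by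
      rcases hj3 with hj | hj
      · subst hj; simpa using (by omega : (1:Int) ≤ n)
      · exact hj
    have h1 : j + 1 ≤ (pvRep n).length := pvRep_len_ge j n hge
    have h2 : (pvRep n).length ≤ j + 1 := pvRep_len_le (j+1) n hjlt
    rw [show (j+1) - (pvRep n).length = 0 by omega]
    simp [hz]


-- ===== VERDICT (by name: the statement is the Claim_ definition above) =====
theorem binary_to_ternary_spec : Claim_equal_binary_to_ternary := by
  intro s _ hpre
  unfold Spec_binary_to_ternary binary_to_ternary binary_to_ternary_alt
  unfold Pre_binary_to_ternary at hpre
  cases hev : PySem.Int.ofStrBase? s 2 with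
  | none => simp [hev] at hpre
  | some n =>
    dsimp only
    simp only [hev, Option.getD_some] at hpre
    by_cases h0 : n = 0
    · subst h0
      rw [if_pos rfl, pv_join_nil, pvB_chars 0 (by norm_num), if_pos rfl]
    · rw [if_neg h0]
      rw [pv_join_nil ((pvALoop n []).reverse), pv_key n.toNat n (le_refl _)]
      rw [pv_join_nil (pvOutLoop n (pvFindPow n 1) []), pvB_chars n hpre, if_neg h0]
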